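-- pv_equiv track=rewrite | github.com/andrewradin/duma | web1/dtk/scores.py | get_ranked_groups
-- ===== SOURCE A (Python) =====
-- def get_ranked_groups(ordering):
--     '''Given an ordering sorted in descending order, return rank information.
--
--     For every distinct score, return a pair like:
--     (number of higher scores,list of keys of all scores tied at this level)
--     '''
--     ahead = 0
--     tied = []
--     last_score = None
--     for label,score in ordering:
--         if score != last_score:
--             if tied:
--                 yield (ahead,tied)
--             ahead += len(tied)
--             tied = []
--             last_score = score
--         tied.append(label)
--     if tied:
--         yield (ahead,tied)
-- ===== SOURCE B (Python) =====
-- def get_ranked_groups(ordering):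
--     '''Given an ordering sorted in descending order, return rank information.
--
--     For every distinct score, return a pair like:
--     (number of higher scores,list of keys of all scores tied at this level)
--     '''
--     ahead = 0
--     rest = list(ordering)
--     while rest:
--         score = rest[0][1]
--         run = 1
--         while run < len(rest) and rest[run][1] == score:
--             run += 1
--         yield (ahead, [label for label, _ in rest[:run]])
--         ahead += run
--         rest = rest[run:]
-- ===== Notes on version B (the rewrite author's own statement) =====
-- stated objective: alternative
-- what changed: Replaces A's deferred-yield state machine (last_score/tied accumulator with a trailing flush) by a run-extraction scan: each iteration measures the run of equal scores at the front, yields it immediately with ahead, and advances past it.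
import Mathlib
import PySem

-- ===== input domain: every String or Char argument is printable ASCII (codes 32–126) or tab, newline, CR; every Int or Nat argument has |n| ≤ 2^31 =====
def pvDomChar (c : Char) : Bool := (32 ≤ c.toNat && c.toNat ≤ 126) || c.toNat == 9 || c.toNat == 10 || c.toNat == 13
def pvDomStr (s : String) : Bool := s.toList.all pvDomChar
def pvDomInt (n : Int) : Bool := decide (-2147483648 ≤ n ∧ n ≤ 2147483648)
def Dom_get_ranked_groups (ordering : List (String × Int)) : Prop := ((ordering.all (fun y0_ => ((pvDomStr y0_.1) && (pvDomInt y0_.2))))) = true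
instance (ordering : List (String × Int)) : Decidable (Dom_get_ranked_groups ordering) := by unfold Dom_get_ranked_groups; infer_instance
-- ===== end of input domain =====

-- B replaces A's deferred-yield state machine (last_score/tied with trailing flush)
-- by a run-extraction scan: measure the run of equal scores at the front, emit it, advance.


-- ===== PORT A =====
-- the for-loop of A, state (ahead, tied, last_score); yields are emitted in order
def pvALoop (ahead : Int) (tied : List String) (last : Option Int) :
    List (String × Int) → List (Int × List String)
  | [] => if tied.isEmpty then [] else [(ahead, tied)]
  | (label, score) :: rest =>
    if some score ≠ last then
      (if tied.isEmpty then [] else [(ahead, tied)]) ++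
        pvALoop (ahead + (tied.length : Int)) [label] (some score) rest
    else
      pvALoop ahead (tied ++ [label]) last rest

def get_ranked_groups (ordering : List (String × Int)) : List (Int × List String) :=
  pvALoop 0 [] none ordering

-- ===== PORT B =====
-- B's inner while-loop finds the run of scores equal to rest[0][1]; the run
-- `rest[:run]` is head plus takeWhile of the tail, `rest[run:]` is dropWhile (exact).
def pvBLoop (ahead : Int) : List (String × Int) → List (Int × List String)
  | [] => []
  | (label, score) :: tail =>
    let same := tail.takeWhile (fun p => p.2 == score)
    (ahead, label :: same.map Prod.fst) ::
      pvBLoop (ahead + (1 + (same.length : Int))) (tail.dropWhile (fun p => p.2 == score))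
  termination_by xs => xs.length
  decreasing_by
    simpa using Nat.lt_succ_of_le (List.length_dropWhile_le _ _)

def get_ranked_groups_alt (ordering : List (String × Int)) : List (Int × List String) :=
  pvBLoop 0 ordering

-- ===== PRECONDITION & SPEC =====
def Spec_get_ranked_groups (ordering : List (String × Int)) (out : List (Int × List String)) : Prop := out = get_ranked_groups_alt ordering
instance (ordering : List (String × Int)) (out : List (Int × List String)) : Decidable (Spec_get_ranked_groups ordering out) := by unfold Spec_get_ranked_groups; infer_instance

-- ===== CLAIM (what is proved, stated in full; the proofs are below) =====
def Claim_equal_get_ranked_groups : Prop := ∀ (ordering : List (String × Int)), Dom_get_ranked_groups ordering → Spec_get_ranked_groups ordering (get_ranked_groups ordering)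

-- ===== LEMMAS AND PROOFS =====

lemma pvBLoop_congr (a b : Int) (xs : List (String × Int)) (h : a = b) :
    pvBLoop a xs = pvBLoop b xs := by rw [h]

lemma pvALoop_run : ∀ (xs : List (String × Int)) (a : Int) (tied : List String) (s : Int),
    tied ≠ [] →
    pvALoop a tied (some s) xs =
      (a, tied ++ (xs.takeWhile (fun p => p.2 == s)).map Prod.fst) ::
        pvBLoop (a + (tied.length : Int) + ((xs.takeWhile (fun p => p.2 == s)).length : Int))
          (xs.dropWhile (fun p => p.2 == s)) := by
  intro xs
  induction xs with
  | nil =>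
    intro a tied s h
    simp [pvALoop, pvBLoop, h]
  | cons hd tl ih =>
    intro a tied s h
    obtain ⟨l, s'⟩ := hd
    by_cases hs : s' = s
    · subst hs
      rw [pvALoop]
      rw [if_neg (by simp : ¬(some s' ≠ some s'))]
      rw [ih a (tied ++ [l]) s' (by simp)]
      rw [List.takeWhile_cons_of_pos (by simp), List.dropWhile_cons_of_pos (by simp)]
      congr 1
      · simp
      · apply pvBLoop_congr
        simp only [List.length_append, List.length_cons, List.length_nil]
        push_cast
        ring
    · have hne : some s' ≠ some s := by simpa using hs
      have hb : ¬ ((l, s').2 == s) = true := by simpa using hs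
      rw [pvALoop]
      rw [if_pos hne]
      rw [if_neg (by simp [h])]
      rw [ih (a + (tied.length : Int)) [l] s' (by simp)]
      have hb' : ((l, s').2 == s) = false := by simpa using hs
      simp only [List.takeWhile_cons, List.dropWhile_cons, hb', Bool.false_eq_true, if_false]
      rw [pvBLoop]
      simp only [List.map, List.length_cons, List.length_nil, List.append_nil,
        List.cons_append, List.nil_append]
      congr 2
      · simp
      · apply pvBLoop_congr
        push_cast
        omega

-- ===== VERDICT (by name: the statement is the Claim_ definition above) =====
theorem get_ranked_groups_spec : Claim_equal_get_ranked_groups := by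
  intro ordering _
  unfold Spec_get_ranked_groups get_ranked_groups get_ranked_groups_alt
  cases ordering with
  | nil => simp [pvALoop, pvBLoop]
  | cons hd tl =>
    obtain ⟨l, s⟩ := hd
    rw [pvALoop]
    rw [if_pos (by simp : some s ≠ (none : Option Int))]
    simp only [List.isEmpty_nil, ite_true, List.nil_append, List.length_nil,
      Nat.cast_zero, add_zero]
    rw [pvALoop_run tl 0 [l] s (by simp), pvBLoop]
    simp only [List.singleton_append, List.length_cons, List.length_nil]
    congr 1
    apply pvBLoop_congr
    push_cast
    ring
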